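-- pv_equiv track=rewrite | github.com/tofugukanae/wanikani-impact-checker | main.py | is_verb_like
-- ===== SOURCE A (Python) =====
-- def is_verb_like(parts_of_speech):
--     normalized = [p.lower() for p in parts_of_speech]
--
--     verb_keywords = [
--         "verb",
--         "suru verb",
--         "transitive verb",
--         "intransitive verb",
--         "godan verb",
--         "ichidan verb",
--     ]
--
--     for pos in normalized:
--         for keyword in verb_keywords:
--             if keyword in pos:
--                 return True
--
--     return False
-- ===== SOURCE B (Python) =====
-- def is_verb_like(parts_of_speech):
--     # Every keyword in A's table contains "verb", so a single substring test suffices.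
--     return any("verb" in p.lower() for p in parts_of_speech)
-- ===== Notes on version B (the rewrite author's own statement) =====
-- stated objective: simpler
-- what changed: Dropped the keyword table and its inner scan: since every keyword contains 'verb', B is a single pass testing 'verb' in p.lower() for each element.
import Mathlib
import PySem

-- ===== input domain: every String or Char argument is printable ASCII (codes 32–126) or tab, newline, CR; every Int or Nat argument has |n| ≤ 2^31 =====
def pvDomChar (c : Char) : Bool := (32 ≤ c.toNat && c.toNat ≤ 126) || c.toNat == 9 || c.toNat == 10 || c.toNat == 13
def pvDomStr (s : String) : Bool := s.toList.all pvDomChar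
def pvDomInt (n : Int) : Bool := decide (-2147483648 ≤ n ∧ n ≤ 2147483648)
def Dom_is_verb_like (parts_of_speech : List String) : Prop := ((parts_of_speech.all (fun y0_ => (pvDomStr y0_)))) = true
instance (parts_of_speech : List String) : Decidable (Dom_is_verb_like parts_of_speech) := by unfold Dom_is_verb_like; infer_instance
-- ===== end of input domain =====

-- ===== PORT A =====
-- A: lowercase each element, then scan each against the keyword table, returning on first hit.
def vkKeywords : List String :=
  ["verb", "suru verb", "transitive verb", "intransitive verb", "godan verb", "ichidan verb"]

def is_verb_like (parts_of_speech : List String) : Bool :=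
  let normalized := parts_of_speech.map PySem.Str.lower
  normalized.any (fun pos => vkKeywords.any (fun keyword => PySem.Str.isIn keyword pos))

-- ===== PORT B =====
-- B: single pass, one substring test per element (every keyword contains "verb").
def is_verb_like_alt (parts_of_speech : List String) : Bool :=
  parts_of_speech.any (fun p => PySem.Str.isIn "verb" (PySem.Str.lower p))

-- ===== PRECONDITION & SPEC =====
def Spec_is_verb_like (parts_of_speech : List String) (out : Bool) : Prop := out = is_verb_like_alt parts_of_speech
instance (parts_of_speech : List String) (out : Bool) : Decidable (Spec_is_verb_like parts_of_speech out) := by unfold Spec_is_verb_like; infer_instance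

-- ===== CLAIM (what is proved, stated in full; the proofs are below) =====
def Claim_equal_is_verb_like : Prop := ∀ (parts_of_speech : List String), Dom_is_verb_like parts_of_speech → Spec_is_verb_like parts_of_speech (is_verb_like parts_of_speech)

-- ===== LEMMAS AND PROOFS =====

-- ===== VERDICT (by name: the statement is the Claim_ definition above) =====
-- The inner keyword scan collapses: every keyword has "verb" as a substring.
theorem inner_scan_eq (pos : String) :
    vkKeywords.any (fun keyword => PySem.Str.isIn keyword pos) = PySem.Str.isIn "verb" pos := by
  simp only [vkKeywords, List.any_cons, List.any_nil, Bool.or_false]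
  cases h : PySem.Str.isIn "verb" pos with
  | true => simp
  | false =>
    have hnf : ¬ ("verb".toList <:+: pos.toList) := by
      simpa [PySem.Chars.isIn_eq_false_iff] using h
    have hkw : ∀ kw : String, ("verb".toList <:+: kw.toList) → PySem.Str.isIn kw pos = false := by
      intro kw hsub
      rw [PySem.Str.isIn_eq, PySem.Chars.isIn_eq_false_iff]
      intro hinf
      exact hnf (hsub.trans hinf)
    rw [hkw "suru verb" (by decide), hkw "transitive verb" (by decide),
        hkw "intransitive verb" (by decide), hkw "godan verb" (by decide),
        hkw "ichidan verb" (by decide)]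
    simp

theorem is_verb_like_spec : Claim_equal_is_verb_like := by
  intro parts_of_speech _
  unfold Spec_is_verb_like is_verb_like is_verb_like_alt
  simp only [List.any_map, Function.comp_def, inner_scan_eq]
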